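-- pv_equiv track=rewrite | github.com/SamLacombe555/Questionnaire_attitudes | PythonProject/15 septembre/test boucles debog3.py | qlqchose_for
-- ===== SOURCE A (Python) =====
-- def qlqchose_for(n):
--     qlqchose = ""
--     for i in range(1, n + 1):
--         if i % 2 == 0:
--             qlqchose += "*"
--         else:
--             qlqchose += "-"
--     return qlqchose
-- ===== SOURCE B (Python) =====
-- def qlqchose_for(n):
--     # closed form: repeat the unit '-*' enough times, then cut to length n
--     return ("-*" * (n // 2 + 1))[:n]
-- ===== Notes on version B (the rewrite author's own statement) =====
-- stated objective: faster
-- what changed: Replaces the per-index loop with parity tests and repeated string concatenation by a closed-form build: repeat the unit '-*' once and slice to length n.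
import Mathlib
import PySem

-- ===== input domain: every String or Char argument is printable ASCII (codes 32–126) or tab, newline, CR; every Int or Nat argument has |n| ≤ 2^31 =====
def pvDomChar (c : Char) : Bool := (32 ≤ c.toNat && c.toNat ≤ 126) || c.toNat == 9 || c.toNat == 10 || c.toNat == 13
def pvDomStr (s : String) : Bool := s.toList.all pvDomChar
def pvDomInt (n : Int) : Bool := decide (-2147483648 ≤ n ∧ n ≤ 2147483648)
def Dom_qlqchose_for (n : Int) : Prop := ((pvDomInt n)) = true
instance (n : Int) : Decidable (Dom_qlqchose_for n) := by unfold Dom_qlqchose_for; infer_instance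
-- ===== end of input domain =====

-- B builds the alternating string in closed form ('-*' repeated, sliced to n) instead of A's per-index loop.

-- ===== PORT A =====
-- A's loop over range(1, n+1), appending '*' on even i and '-' on odd i;
-- the string accumulator is carried as its list of characters.
def qlqchose_for (n : Int) : String :=
  String.ofList
    ((PySem.List.pyRange 1 (n + 1) 1).foldl
      (fun acc i => acc ++ (if PySem.Int.mod i 2 = 0 then ['*'] else ['-'])) [])

-- ===== PORT B =====
-- ("-*" * (n // 2 + 1))[:n]
def qlqchose_for_alt (n : Int) : String :=
  String.ofList
    (PySem.Chars.slice (PySem.List.pyRepeat ['-', '*'] (PySem.Int.floordiv n 2 + 1)) none (some n))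

-- ===== PRECONDITION & SPEC =====
def Spec_qlqchose_for (n : Int) (out : String) : Prop := out = qlqchose_for_alt n
instance (n : Int) (out : String) : Decidable (Spec_qlqchose_for n out) := by unfold Spec_qlqchose_for; infer_instance

-- ===== CLAIM (what is proved, stated in full; the proofs are below) =====
def Claim_equal_qlqchose_for : Prop := ∀ (n : Int), Dom_qlqchose_for n → Spec_qlqchose_for n (qlqchose_for n)

-- ===== LEMMAS AND PROOFS =====

-- the alternating pattern of length m (index j : '-' on even j, '*' on odd j)
def pvPat (m : Nat) : List Char :=
  (List.range m).map (fun j => if j % 2 = 1 then '*' else '-')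

theorem pvFlattenSingleton {a : Type} (l : List a) (c : a -> Char) :
    (l.map (fun k => [c k])).flatten = l.map c := by
  induction l with
  | nil => rfl
  | cons x t ih => simp [ih]

theorem pvA_eq_pat (m : Nat) :
    (PySem.List.pyRange 1 ((m : Int) + 1) 1).foldl
      (fun acc i => acc ++ (if PySem.Int.mod i 2 = 0 then ['*'] else ['-'])) []
      = pvPat m := by
  rw [PySem.List.foldl_append_eq_flatMap]
  rw [PySem.List.pyRange_one]
  have h1 : ((m : Int) + 1 - 1).toNat = m := by omega
  rw [h1]
  simp only [List.nil_append, List.flatMap_def, List.map_map, Function.comp_def]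
  have hfun : (fun k : Nat => if PySem.Int.mod (1 + (k : Int)) 2 = 0 then (['*'] : List Char) else ['-'])
      = fun k : Nat => [if k % 2 = 1 then '*' else '-'] := by
    funext k
    have hm : PySem.Int.mod (1 + (k : Int)) 2 = (((1 + k) % 2 : Nat) : Int) := by
      simp [PySem.Int.mod, Int.fmod_eq_emod]
    rw [hm]
    rcases Nat.even_or_odd k with ⟨c, hc⟩ | ⟨c, hc⟩
    · have h2 : (1 + (c + c)) % 2 = 1 := by omega
      have h3 : (c + c) % 2 = 0 := by omega
      rw [hc, h2, h3]; norm_num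
    · have h2 : (1 + (2 * c + 1)) % 2 = 0 := by omega
      have h3 : (2 * c + 1) % 2 = 1 := by omega
      rw [hc, h2, h3]; norm_num
  rw [hfun, pvFlattenSingleton, pvPat]

theorem pvRep_eq_range (K : Nat) :
    (List.replicate K (['-', '*'] : List Char)).flatten
      = (List.range (2 * K)).map (fun j => if j % 2 = 1 then '*' else '-') := by
  induction K with
  | zero => simp
  | succ k ih =>
    rw [List.replicate_succ', List.flatten_append, ih]
    have h2 : 2 * (k + 1) = (2 * k + 1) + 1 := by omega
    rw [h2, List.range_succ, List.range_succ]
    simp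

theorem pvB_eq_pat (m : Nat) :
    PySem.Chars.slice
      (PySem.List.pyRepeat ['-', '*'] (PySem.Int.floordiv (m : Int) 2 + 1)) none (some (m : Int))
      = pvPat m := by
  have hk : PySem.Int.floordiv (m : Int) 2 + 1 = ((m / 2 + 1 : Nat) : Int) := by
    have : PySem.Int.floordiv (m : Int) 2 = ((m / 2 : Nat) : Int) := by
      simp [PySem.Int.floordiv, Int.fdiv_eq_ediv]
    rw [this]; push_cast; ring
  rw [hk]
  have hrep : PySem.List.pyRepeat ['-', '*'] ((m / 2 + 1 : Nat) : Int)
      = (List.replicate (m / 2 + 1) (['-', '*'] : List Char)).flatten := by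
    simp [PySem.List.pyRepeat]
    congr 1
  rw [hrep, PySem.Chars.slice, PySem.List.slice_to_natCast, pvRep_eq_range]
  rw [← List.map_take, List.take_range]
  have : min m (2 * (m / 2 + 1)) = m := by omega
  rw [this, pvPat]

theorem pvNeg_case (n : Int) (hn : n < 0) :
    qlqchose_for n = qlqchose_for_alt n := by
  unfold qlqchose_for qlqchose_for_alt
  have hA : PySem.List.pyRange 1 (n + 1) 1 = [] :=
    PySem.List.pyRange_one_eq_nil (by omega)
  have hq : PySem.Int.floordiv n 2 ≤ -1 := by
    have h := (PySem.Int.floordiv_eq_iff_of_pos (a := n) (b := 2)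
      (q := PySem.Int.floordiv n 2) (by norm_num)).mp rfl
    omega
  have hrep : PySem.List.pyRepeat (['-', '*'] : List Char) (PySem.Int.floordiv n 2 + 1) = [] := by
    have hk : PySem.Int.floordiv n 2 + 1 ≤ 0 := by omega
    generalize PySem.Int.floordiv n 2 + 1 = k at hk
    simp [PySem.List.pyRepeat]
    exact hk
  rw [hA, hrep]
  simp [PySem.Chars.slice, PySem.List.slice]

-- ===== VERDICT (by name: the statement is the Claim_ definition above) =====
theorem qlqchose_for_spec : Claim_equal_qlqchose_for := by
  intro n _
  unfold Spec_qlqchose_for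
  rcases lt_or_ge n 0 with hn | hn
  · exact pvNeg_case n hn
  · obtain ⟨m, rfl⟩ := Int.eq_ofNat_of_zero_le hn
    unfold qlqchose_for qlqchose_for_alt
    rw [pvA_eq_pat, pvB_eq_pat]
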